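-- pv_equiv track=rewrite | github.com/maxjmohr/adventofcode-2025 | day_03/main.py | largest_joltage_2digits
-- ===== SOURCE A (Python) =====
-- def largest_joltage_2digits(bank: list[int]) -> int:
--     """Find the largest joltage (2 digits) in a bank of batteries
--     Start with 1 as first and 0 as last digit
--     Kind of a sliding window, if first digit is larger or same than stored, then find the max value after that as second digit and check if now largest joltage
--     If first digit already smaller than stored largest joltage, skip
--     """
--     max_joltage: int = 10
--     n: int = len(bank)
--
--     # Loop through all digits (except last one as we need 2 digits)
--     for i in range(n - 1):
--         first: int = bank[i]
--
--         # If first digit already smaller than first digit of max_joltage, skip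
--         if first < max_joltage // 10:
--             continue
--
--         # Else get the max second digit of the remaining digits
--         second: int = max(bank[i + 1 :])
--
--         # Check if this is the largest joltage
--         joltage: int = first * 10 + second
--         if joltage > max_joltage:
--             max_joltage = joltage
--
--     return max_joltage
-- ===== SOURCE B (Python) =====
-- def largest_joltage_2digits(bank: list[int]) -> int:
--     """Build suffix maxima back-to-front once, then a single forward
--     pass applies the same prune-and-update recurrence without rescanning."""
--     smax = []
--     for x in reversed(bank):
--         smax.append(x if not smax or x > smax[-1] else smax[-1])
--     smax.reverse()
--     m = 10
--     for first, second in zip(bank, smax[1:]):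
--         if first >= m // 10:
--             j = first * 10 + second
--             if j > m:
--                 m = j
--     return m
-- ===== Notes on version B (the rewrite author's own statement) =====
-- stated objective: alternative
-- what changed: Replaced the per-index rescan max(bank[i+1:]) by a suffix-max array built once back-to-front, followed by a single forward pass applying the same prune-and-update recurrence; worst-case cost drops from quadratic to linear, but on random inputs A's pruning already skips most rescans so measured times are similar.
import Mathlib
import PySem

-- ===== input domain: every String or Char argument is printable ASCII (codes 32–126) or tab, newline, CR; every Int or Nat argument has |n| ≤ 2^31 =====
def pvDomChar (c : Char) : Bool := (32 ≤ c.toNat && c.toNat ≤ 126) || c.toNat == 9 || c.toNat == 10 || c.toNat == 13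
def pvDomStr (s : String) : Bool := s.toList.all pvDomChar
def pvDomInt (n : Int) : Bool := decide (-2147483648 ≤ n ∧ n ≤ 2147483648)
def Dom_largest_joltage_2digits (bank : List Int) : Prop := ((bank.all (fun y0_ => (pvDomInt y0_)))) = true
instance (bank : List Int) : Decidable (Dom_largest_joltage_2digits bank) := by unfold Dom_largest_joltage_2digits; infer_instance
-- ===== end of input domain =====

-- B replaces A's per-index rescan of the suffix by a suffix-max array built once, then one forward pass with the same prune-and-update recurrence; same values everywhere.

-- ===== PORT A =====
def largest_joltage_2digits (bank : List Int) : Int :=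
  let n : Int := bank.length
  (PySem.List.pyRange 0 (n - 1) 1).foldl
    (fun M i =>
      let first : Int := PySem.List.pyGetD bank i 0
      if first < PySem.Int.floordiv M 10 then M
      else
        match PySem.List.max? (PySem.List.slice bank (some (i + 1)) none) (fun y => y) with
        | none => M  -- unreachable: the slice is nonempty for every i < n - 1
        | some second =>
          let joltage : Int := first * 10 + second
          if joltage > M then joltage else M)
    10

-- ===== PORT B =====
-- suffix maxima built back-to-front (Source B's reversed/append/reverse loop)
def suffMaxes : List Int → List Int
  | [] => []
  | x :: xs =>
    match suffMaxes xs with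
    | [] => [x]
    | y :: ys => (if x > y then x else y) :: y :: ys

def largest_joltage_2digits_alt (bank : List Int) : Int :=
  (bank.zip (suffMaxes bank).tail).foldl
    (fun m p =>
      if p.1 ≥ PySem.Int.floordiv m 10 then
        let j : Int := p.1 * 10 + p.2
        if j > m then j else m
      else m)
    10

-- ===== PRECONDITION & SPEC =====
def Spec_largest_joltage_2digits (bank : List Int) (out : Int) : Prop := out = largest_joltage_2digits_alt bank
instance (bank : List Int) (out : Int) : Decidable (Spec_largest_joltage_2digits bank out) := by unfold Spec_largest_joltage_2digits; infer_instance

-- ===== CLAIM (what is proved, stated in full; the proofs are below) =====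
def Claim_equal_largest_joltage_2digits : Prop := ∀ (bank : List Int), Dom_largest_joltage_2digits bank → Spec_largest_joltage_2digits bank (largest_joltage_2digits bank)

-- ===== LEMMAS AND PROOFS =====

-- head of the suffix-max list is the running max of the list
lemma foldl_max_shift (t : List Int) : ∀ a b : Int, t.foldl max (max a b) = max a (t.foldl max b) := by
  induction t with
  | nil => intro a b; simp
  | cons y ys ih =>
    intro a b
    simp only [List.foldl_cons]
    rw [max_assoc, ih]

lemma suffMaxes_head (x : Int) (t : List Int) :
    suffMaxes (x :: t) = (t.foldl max x) :: (suffMaxes t) := by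
  induction t generalizing x with
  | nil => simp [suffMaxes]
  | cons y ys ih =>
    rw [suffMaxes, ih y]
    simp only [List.foldl_cons]
    rw [foldl_max_shift ys x y]
    have : (if x > ys.foldl max y then x else ys.foldl max y) = max x (ys.foldl max y) := by
      rw [max_def]; split_ifs <;> omega
    rw [this]

-- the two step functions agree pointwise
lemma step_eq (M x s : Int) :
    (if x < PySem.Int.floordiv M 10 then M
     else if x * 10 + s > M then x * 10 + s else M) =
    (if x ≥ PySem.Int.floordiv M 10 then
       if x * 10 + s > M then x * 10 + s else M
     else M) := by
  by_cases h : x < PySem.Int.floordiv M 10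
  · rw [if_pos h, if_neg (not_le.mpr h)]
  · rw [if_neg h, if_pos (not_lt.mp h)]

-- main loop equality, generalized over the accumulator
lemma fold_eq (bank : List Int) : ∀ M : Int,
    (PySem.List.pyRange 0 ((bank.length : Int) - 1) 1).foldl
      (fun M i =>
        let first : Int := PySem.List.pyGetD bank i 0
        if first < PySem.Int.floordiv M 10 then M
        else
          match PySem.List.max? (PySem.List.slice bank (some (i + 1)) none) (fun y => y) with
          | none => M
          | some second =>
            let joltage : Int := first * 10 + second
            if joltage > M then joltage else M) M
    =
    (bank.zip (suffMaxes bank).tail).foldl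
      (fun m p =>
        if p.1 ≥ PySem.Int.floordiv m 10 then
          let j : Int := p.1 * 10 + p.2
          if j > m then j else m
        else m) M := by
  induction bank with
  | nil =>
    intro M
    rw [PySem.List.pyRange_one_eq_nil (by simp)]
    simp
  | cons x xs ih =>
    intro M
    cases xs with
    | nil =>
      rw [PySem.List.pyRange_one_eq_nil (by simp)]
      simp [suffMaxes]
    | cons y ys =>
      -- left side: peel off index 0, reindex the rest onto (y :: ys)
      have hlen : ((x :: y :: ys).length : Int) - 1 = ((y :: ys).length : Int) := by
        simp
      rw [hlen, PySem.List.pyRange_one_cons (by simp)]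
      simp only [List.foldl_cons]
      -- evaluate the first step of A
      have hget0 : PySem.List.pyGetD (x :: y :: ys) (0 : Int) 0 = x := by
        simp [PySem.List.pyGetD_zero_cons]
      have hslice0 : PySem.List.slice (x :: y :: ys) (some ((0 : Int) + 1)) none = y :: ys := by
        norm_num [PySem.List.slice_from_one]
      have hmax0 : PySem.List.max? (y :: ys) (fun y => y) = some (ys.foldl max y) :=
        PySem.List.max?_id_cons y ys
      rw [hget0, hslice0, hmax0]
      -- evaluate the first step of B
      rw [suffMaxes_head x (y :: ys)]
      simp only [List.tail_cons]
      rw [suffMaxes_head y ys]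
      simp only [List.foldl_cons, List.zip_cons_cons, List.foldl_cons]
      rw [step_eq M x (ys.foldl max y)]
      have ih' := ih (if x ≥ PySem.Int.floordiv M 10 then
          if x * 10 + ys.foldl max y > M then x * 10 + ys.foldl max y else M else M)
      simp only [suffMaxes_head, List.tail_cons] at ih'
      -- reindex A's remaining loop (indices 1.. of x::y::ys) onto (y::ys) (indices 0..)
      refine Eq.trans ?_ ih'
      rw [PySem.List.pyRange_one, PySem.List.pyRange_one]
      rw [List.foldl_map, List.foldl_map]
      have hn : ((((y :: ys).length : Int)) - (0 + 1)).toNat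
          = ((((y :: ys).length : Int) - 1) - 0).toNat := by omega
      rw [hn]
      apply PySem.List.foldl_congr_mem
      intro acc k _
      have e1 : PySem.List.pyGetD (x :: y :: ys) (0 + 1 + (k : Int)) 0
          = PySem.List.pyGetD (y :: ys) (0 + (k : Int)) 0 := by
        have h1 : (0 : Int) + 1 + (k : Int) = ((k + 1 : Nat) : Int) := by push_cast; ring
        have h2 : (0 : Int) + (k : Int) = ((k : Nat) : Int) := by ring
        rw [h1, h2, PySem.List.pyGetD_natCast, PySem.List.pyGetD_natCast]
        rfl
      have e2 : PySem.List.slice (x :: y :: ys) (some (0 + 1 + (k : Int) + 1)) none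
          = PySem.List.slice (y :: ys) (some (0 + (k : Int) + 1)) none := by
        have h1 : (0 : Int) + 1 + (k : Int) + 1 = ((k + 2 : Nat) : Int) := by push_cast; ring
        have h2 : (0 : Int) + (k : Int) + 1 = ((k + 1 : Nat) : Int) := by push_cast; ring
        rw [h1, h2, PySem.List.slice_from_natCast, PySem.List.slice_from_natCast]
        rfl
      simp only [e1, e2]

-- ===== VERDICT (by name: the statement is the Claim_ definition above) =====
theorem largest_joltage_2digits_spec : Claim_equal_largest_joltage_2digits := by
  intro bank _
  unfold Spec_largest_joltage_2digits largest_joltage_2digits largest_joltage_2digits_alt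
  exact fold_eq bank 10
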